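-- pv_equiv track=rewrite | github.com/rtCamp/next-pms | next_pms/resource_management/report/team_availability/utils.py | sort_by_reports_to
-- ===== SOURCE A (Python) =====
-- from collections import defaultdict
--
-- def sort_by_reports_to(employees):
--     result = []
--     reporting_map = defaultdict(list)
--
--     employee_map = {}
--
--     for emp in employees:
--         employee_map[emp["name"]] = emp
--         reporting_map[emp.get("reports_to")].append(emp["name"])
--
--     def dfs(emp_id):
--         emp = employee_map.get(emp_id)
--         if emp:
--             result.append(emp)
--         for subordinate in sorted(reporting_map.get(emp_id, [])):
--             dfs(subordinate)
--
--     top_level_emps = [emp for emp in employees if emp["reports_to"] not in employee_map]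
--
--     for top_emp in sorted(top_level_emps, key=lambda x: x["name"]):
--         dfs(top_emp["name"])
--     return result
-- ===== SOURCE B (Python) =====
-- def sort_by_reports_to(employees):
--     emp_map = {e["name"]: e for e in employees}
--     ordered = sorted(employees, key=lambda e: e["name"])
--     children = {}
--     for e in ordered:
--         if e["reports_to"] in emp_map:
--             children.setdefault(e["reports_to"], []).append(e["name"])
--
--     def walk(n):
--         return [emp_map[n]] + [x for c in children.get(n, []) for x in walk(c)]
--
--     return [x for e in ordered if e["reports_to"] not in emp_map for x in walk(e["name"])]
-- ===== Notes on version B (the rewrite author's own statement) =====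
-- stated objective: alternative
-- what changed: B replaces A's mutable-accumulator closure DFS over a defaultdict reporting_map (a sorted() call per visited node plus a keyed sort of the top level) by one global sort of the employees by name, a single grouping pass into a children dict, and a pure recursive walk that returns and concatenates sublists.
import Mathlib
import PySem

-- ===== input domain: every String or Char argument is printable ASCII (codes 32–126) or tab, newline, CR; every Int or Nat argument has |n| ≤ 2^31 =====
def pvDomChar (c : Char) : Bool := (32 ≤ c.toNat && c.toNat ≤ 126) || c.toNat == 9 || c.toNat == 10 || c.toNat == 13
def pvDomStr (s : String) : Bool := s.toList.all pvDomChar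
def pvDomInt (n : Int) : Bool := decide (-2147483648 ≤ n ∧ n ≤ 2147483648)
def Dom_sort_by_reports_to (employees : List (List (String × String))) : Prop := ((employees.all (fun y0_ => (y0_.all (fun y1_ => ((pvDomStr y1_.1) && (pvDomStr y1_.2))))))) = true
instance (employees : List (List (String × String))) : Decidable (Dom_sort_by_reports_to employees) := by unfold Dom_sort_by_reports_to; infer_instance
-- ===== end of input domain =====

-- B replaces A's mutable-accumulator DFS (a defaultdict of buckets with a sorted() call per visited
-- node, plus a keyed sort of the top level) by one global sort of the employees by name, a single
-- grouping pass into a children dict, and a pure recursive walk that concatenates sublists.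

-- ===== PORT A =====
-- emp[k]: Python raises KeyError when k is missing (such inputs are outside Pre_); here that case yields ""
def pvItem (e : List (String × String)) (k : String) : String :=
  ((PySem.Dict.mk e).get? k).getD ""

-- emp.get(k)
def pvGetOpt (e : List (String × String)) (k : String) : Option String :=
  (PySem.Dict.mk e).get? k

-- A's inner dfs; the Nat argument is a fuel guard only (on inputs satisfying Pre_ the recursion
-- depth is bounded by the number of employees; the unbounded Python recursion overflows exactly on
-- reporting cycles, which Pre_ excludes)
def pvDfs (em : PySem.Dict String (List (String × String)))
    (rm : PySem.Dict (Option String) (List String)) :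
    Nat → String → List (List (String × String)) → List (List (String × String))
  | 0, _, res => res
  | f+1, empId, res =>
    let res1 := match em.get? empId with
      | some emp => if emp.isEmpty then res else res ++ [emp]  -- 'if emp:' — an empty dict is falsy
      | none => res
    (PySem.List.sorted (rm.getD (some empId) []) (fun x => x)).foldl
      (fun r c => pvDfs em rm f c r) res1

def sort_by_reports_to (employees : List (List (String × String))) : List (List (String × String)) :=
  -- one loop builds employee_map and reporting_map (a defaultdict keyed by emp.get("reports_to"))
  let maps := employees.foldl
    (fun (md : PySem.Dict String (List (String × String)) × PySem.Dict (Option String) (List String)) emp =>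
      (md.1.insert (pvItem emp "name") emp,
       md.2.modify (pvGetOpt emp "reports_to") [] (· ++ [pvItem emp "name"])))
    (PySem.Dict.empty, PySem.Dict.empty)
  let top_level_emps := employees.filter (fun emp => !(maps.1.contains (pvItem emp "reports_to")))
  (PySem.List.sorted top_level_emps (fun x => pvItem x "name")).foldl
    (fun res t => pvDfs maps.1 maps.2 (employees.length + 1) (pvItem t "name") res) []

-- ===== PORT B =====
-- B's walk; same fuel guard as pvDfs. Python's emp_map[n] raises KeyError on a missing name, which
-- walk never meets (it is only called on employee names); that branch yields [] here.
def pvWalk (em : PySem.Dict String (List (String × String)))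
    (ch : PySem.Dict String (List String)) :
    Nat → String → List (List (String × String))
  | 0, _ => []
  | f+1, n =>
    (match em.get? n with | some e => [e] | none => []) ++
      (ch.getD n []).flatMap (pvWalk em ch f)

def sort_by_reports_to_alt (employees : List (List (String × String))) : List (List (String × String)) :=
  let em := employees.foldl (fun d e => d.insert (pvItem e "name") e) PySem.Dict.empty
  let ordered := PySem.List.sorted employees (fun e => pvItem e "name")
  -- children.setdefault(p, []).append(n) = modify p with default []
  let children := ordered.foldl
    (fun (d : PySem.Dict String (List String)) e =>
      if em.contains (pvItem e "reports_to")
      then d.modify (pvItem e "reports_to") [] (· ++ [pvItem e "name"]) else d)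
    PySem.Dict.empty
  (ordered.filter (fun e => !(em.contains (pvItem e "reports_to")))).flatMap
    (fun e => pvWalk em children (employees.length + 1) (pvItem e "name"))

-- ===== PRECONDITION & SPEC =====
-- graph reachability on the input's reporting edges (a shape condition on the input only):
-- one expansion step adds every employee name whose reports_to is already in the set
def pvReachStep (es : List (List (String × String))) (V : PySem.Set String) : PySem.Set String :=
  PySem.Set.update V
    ((es.filter (fun e => PySem.Set.contains V (pvItem e "reports_to"))).map (fun e => pvItem e "name"))

def pvReach (es : List (List (String × String))) : Nat → PySem.Set String → PySem.Set String
  | 0, V => V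
  | k+1, V => pvReach es k (pvReachStep es V)

-- the names dfs starts from: names of employees whose reports_to is no employee's name
def pvTopNames (es : List (List (String × String))) : List String :=
  (es.filter (fun e =>
    !((es.map (fun x => pvItem x "name")).contains (pvItem e "reports_to")))).map
    (fun e => pvItem e "name")

-- Pre_ requires every employee dict to carry the "name" and "reports_to" keys (A raises KeyError
-- otherwise), each association list to have distinct keys (a duplicate-keyed list does not denote a
-- Python dict faithfully), and that no employee name both lies on a reporting cycle and is reachable
-- from a top-level name: exactly there A's unbounded recursion raises RecursionError.
def Pre_sort_by_reports_to (employees : List (List (String × String))) : Prop :=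
  (∀ e ∈ employees,
    (e.map Prod.fst).Nodup ∧ "name" ∈ e.map Prod.fst ∧ "reports_to" ∈ e.map Prod.fst) ∧
  (∀ e ∈ employees,
    ¬ (PySem.Set.contains
        (pvReach employees employees.length (PySem.Set.ofList (pvTopNames employees)))
        (pvItem e "name") = true ∧
      PySem.Set.contains
        (pvReach employees employees.length (PySem.Set.ofList
          ((employees.filter (fun c => pvItem c "reports_to" == pvItem e "name")).map
            (fun c => pvItem c "name"))))
        (pvItem e "name") = true))

instance (employees : List (List (String × String))) : Decidable (Pre_sort_by_reports_to employees) := by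
  unfold Pre_sort_by_reports_to; infer_instance

def pvWitness_sort_by_reports_to : (List (List (String × String))) :=
  [[("name", "b"), ("reports_to", "a")], [("name", "a"), ("reports_to", "")]]

def Spec_sort_by_reports_to (employees : List (List (String × String))) (out : List (List (String × String))) : Prop := out = sort_by_reports_to_alt employees
instance (employees : List (List (String × String))) (out : List (List (String × String))) : Decidable (Spec_sort_by_reports_to employees out) := by unfold Spec_sort_by_reports_to; infer_instance

-- ===== CLAIM (what is proved, stated in full; the proofs are below) =====
def Claim_equal_sort_by_reports_to : Prop := ∀ (employees : List (List (String × String))), Dom_sort_by_reports_to employees → Pre_sort_by_reports_to employees → Spec_sort_by_reports_to employees (sort_by_reports_to employees)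

-- ===== LEMMAS AND PROOFS =====

-- named pieces of the two ports (for the proofs)
def pvEm (es : List (List (String × String))) : PySem.Dict String (List (String × String)) :=
  es.foldl (fun d e => d.insert (pvItem e "name") e) PySem.Dict.empty

def pvRm (es : List (List (String × String))) : PySem.Dict (Option String) (List String) :=
  es.foldl (fun d e => d.modify (pvGetOpt e "reports_to") [] (· ++ [pvItem e "name"])) PySem.Dict.empty

def pvOrdered (es : List (List (String × String))) : List (List (String × String)) :=
  PySem.List.sorted es (fun e => pvItem e "name")

def pvCh (es : List (List (String × String))) : PySem.Dict String (List String) :=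
  (pvOrdered es).foldl
    (fun d e => if (pvEm es).contains (pvItem e "reports_to")
                then d.modify (pvItem e "reports_to") [] (· ++ [pvItem e "name"]) else d)
    PySem.Dict.empty

lemma sortA_eq (es : List (List (String × String))) :
    sort_by_reports_to es =
      (PySem.List.sorted (es.filter (fun e => !((pvEm es).contains (pvItem e "reports_to"))))
        (fun x => pvItem x "name")).foldl
        (fun res t => pvDfs (pvEm es) (pvRm es) (es.length + 1) (pvItem t "name") res) [] := by
  have h := PySem.List.foldl_prod_mk
    (fun (d : PySem.Dict String (List (String × String))) e => d.insert (pvItem e "name") e)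
    (fun (d : PySem.Dict (Option String) (List String)) e =>
      d.modify (pvGetOpt e "reports_to") [] (· ++ [pvItem e "name"]))
    es PySem.Dict.empty PySem.Dict.empty
  simp only [sort_by_reports_to]
  rw [h]
  rfl

lemma sortB_eq (es : List (List (String × String))) :
    sort_by_reports_to_alt es =
      ((pvOrdered es).filter (fun e => !((pvEm es).contains (pvItem e "reports_to")))).flatMap
        (fun e => pvWalk (pvEm es) (pvCh es) (es.length + 1) (pvItem e "name")) := by
  rfl

-- emp.get(k) returns a value exactly when k is a key
lemma getOpt_eq (e : List (String × String)) (k : String) (hk : k ∈ e.map Prod.fst) :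
    pvGetOpt e k = some (pvItem e k) := by
  unfold pvGetOpt pvItem
  cases h : (PySem.Dict.mk e).get? k with
  | none =>
    rw [PySem.Dict.get?_eq_none_iff_not_mem_keys] at h
    exact absurd (by simpa [PySem.Dict.keys_mk] using hk) h
  | some v => simp

-- membership in the employee list is preserved by sorting
lemma mem_ordered {es : List (List (String × String))} {x : List (String × String)} :
    x ∈ pvOrdered es ↔ x ∈ es := by
  exact (PySem.List.sorted_perm es _ false).mem_iff

-- employee_map.get(n) for an employee name n finds some employee record named n
lemma em_get (es : List (List (String × String))) :
    ∀ n ∈ es.map (fun e => pvItem e "name"),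
      ∃ e ∈ es, (pvEm es).get? n = some e ∧ pvItem e "name" = n := by
  unfold pvEm
  have aux : ∀ (t : List (List (String × String))) (d : PySem.Dict String (List (String × String))),
      ∀ n ∈ t.map (fun e => pvItem e "name"),
      ∃ e ∈ t, (t.foldl (fun d e => d.insert (pvItem e "name") e) d).get? n = some e ∧
        pvItem e "name" = n := by
    intro t
    induction t using List.reverseRecOn with
    | nil => intro d n hn; simp at hn
    | append_singleton t a iht =>
      intro d n hn
      rw [List.foldl_append, List.foldl_cons, List.foldl_nil]
      by_cases hna : n = pvItem a "name"
      · exact ⟨a, by simp, by rw [hna, PySem.Dict.get?_insert_self], hna.symm⟩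
      · simp only [List.map_append, List.map_cons, List.map_nil, List.mem_append,
          List.mem_cons, List.not_mem_nil, or_false] at hn
        rcases hn with hn | hn
        · obtain ⟨e, he, hget, hnm⟩ := iht d n hn
          exact ⟨e, List.mem_append_left _ he,
            by rw [PySem.Dict.get?_insert_of_ne _ _ hna, hget], hnm⟩
        · exact absurd hn hna
  exact aux es PySem.Dict.empty

-- A's reporting_map bucket, characterised
lemma rm_getD (es : List (List (String × String))) (p : String) :
    (pvRm es).getD (some p) [] =
      (es.filter (fun e => pvGetOpt e "reports_to" == some p)).map (fun e => pvItem e "name") := by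
  unfold pvRm
  rw [show es.foldl (fun d e => d.modify (pvGetOpt e "reports_to") [] (· ++ [pvItem e "name"]))
        PySem.Dict.empty =
      (es.map (fun e => (pvGetOpt e "reports_to", pvItem e "name"))).foldl
        (fun d p => d.modify p.1 [] (· ++ [p.2])) PySem.Dict.empty from by rw [List.foldl_map]]
  rw [PySem.Dict.getD_foldl_modify_append, PySem.Dict.getD_empty, List.filter_map, List.map_map]
  rfl

-- B's children bucket, characterised (for keys that are employee names)
lemma ch_getD (es : List (List (String × String))) (p : String)
    (hp : (pvEm es).contains p = true) :
    (pvCh es).getD p [] =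
      ((pvOrdered es).filter (fun e => pvItem e "reports_to" == p)).map (fun e => pvItem e "name") := by
  unfold pvCh
  rw [← List.foldl_filter]
  rw [show ((pvOrdered es).filter
        (fun e => (pvEm es).contains (pvItem e "reports_to"))).foldl
        (fun d e => d.modify (pvItem e "reports_to") [] (· ++ [pvItem e "name"])) PySem.Dict.empty =
      (((pvOrdered es).filter
        (fun e => (pvEm es).contains (pvItem e "reports_to"))).map
          (fun e => (pvItem e "reports_to", pvItem e "name"))).foldl
        (fun d p => d.modify p.1 [] (· ++ [p.2])) PySem.Dict.empty from by rw [List.foldl_map]]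
  rw [PySem.Dict.getD_foldl_modify_append, PySem.Dict.getD_empty]
  simp only [List.nil_append, List.filter_map, List.map_map, Function.comp_def,
    List.filter_filter]
  congr 1
  apply List.filter_congr
  intro x _
  by_cases h : pvItem x "reports_to" = p
  · simp only [h, hp, Bool.and_true]
  · simp [h]

-- two name lists that are each weakly sorted and are permutations of one another coincide
lemma names_eq {l₁ l₂ : List String} (hp : l₁.Perm l₂)
    (h₁ : l₁.Pairwise (· ≤ ·)) (h₂ : l₂.Pairwise (· ≤ ·)) : l₁ = l₂ :=
  hp.eq_of_pairwise (fun _ _ _ _ hab hba => le_antisymm hab hba) h₁ h₂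

-- the names of any filtered sublist, sorted, = the names of the filtered globally sorted list
lemma sorted_names_eq (es : List (List (String × String))) (P : List (String × String) → Bool) :
    PySem.List.sorted ((es.filter P).map (fun e => pvItem e "name")) (fun x => x) =
      ((pvOrdered es).filter P).map (fun e => pvItem e "name") := by
  apply names_eq
  · exact ((PySem.List.sorted_perm _ _ false).trans
      (((PySem.List.sorted_perm es _ false).filter P).map _).symm)
  · exact PySem.List.sorted_pairwise _ _
  · exact List.Pairwise.sublist ((List.filter_sublist).map _)
      (PySem.List.sorted_map_key_pairwise es _)

-- names of the key-sorted filtered employees = names of the filtered globally sorted employees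
lemma sorted_top_names_eq (es : List (List (String × String))) (P : List (String × String) → Bool) :
    (PySem.List.sorted (es.filter P) (fun x => pvItem x "name")).map (fun e => pvItem e "name") =
      ((pvOrdered es).filter P).map (fun e => pvItem e "name") := by
  apply names_eq
  · exact (((PySem.List.sorted_perm _ _ false).map _).trans
      (((PySem.List.sorted_perm es _ false).filter P).map _).symm)
  · exact PySem.List.sorted_map_key_pairwise _ _
  · exact List.Pairwise.sublist ((List.filter_sublist).map _)
      (PySem.List.sorted_map_key_pairwise es _)

-- the central recursion lemma: A's dfs on an employee name = append B's walk of that name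
lemma dfs_eq (es : List (List (String × String)))
    (hkeys : ∀ e ∈ es,
      (e.map Prod.fst).Nodup ∧ "name" ∈ e.map Prod.fst ∧ "reports_to" ∈ e.map Prod.fst) :
    ∀ (f : Nat), ∀ n ∈ es.map (fun e => pvItem e "name"), ∀ res,
      pvDfs (pvEm es) (pvRm es) f n res = res ++ pvWalk (pvEm es) (pvCh es) f n := by
  intro f
  induction f with
  | zero => intro n hn res; simp [pvDfs, pvWalk]
  | succ f ih =>
    intro n hn res
    obtain ⟨e, he, hget, hnm⟩ := em_get es n hn
    have hne : e.isEmpty = false := by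
      have h1 := (hkeys e he).2.1
      cases e with
      | nil => simp at h1
      | cons a t => rfl
    have hcontains : (pvEm es).contains n = true := by
      rw [PySem.Dict.contains_eq_isSome_get?, hget]
      rfl
    have hbucket : (pvRm es).getD (some n) [] =
        (es.filter (fun x => pvItem x "reports_to" == n)).map (fun x => pvItem x "name") := by
      rw [rm_getD]
      congr 1
      apply List.filter_congr
      intro x hx
      rw [getOpt_eq x _ (hkeys x hx).2.2]
      simp
    have hch : (pvCh es).getD n [] =
        ((pvOrdered es).filter (fun x => pvItem x "reports_to" == n)).map
          (fun x => pvItem x "name") := ch_getD es n hcontains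
    have inner : ∀ (l : List String) (acc : List (List (String × String))),
        (∀ x ∈ l, x ∈ es.map (fun e => pvItem e "name")) →
        l.foldl (fun r c => pvDfs (pvEm es) (pvRm es) f c r) acc =
          acc ++ l.flatMap (pvWalk (pvEm es) (pvCh es) f) := by
      intro l
      induction l with
      | nil => intro acc _; simp
      | cons x t iht =>
        intro acc hmem
        simp only [List.foldl_cons]
        rw [ih x (hmem x List.mem_cons_self) acc,
          iht _ (fun y hy => hmem y (List.mem_cons_of_mem x hy))]
        simp [List.append_assoc]
    simp only [pvDfs, pvWalk, hget, hne]
    rw [hbucket, sorted_names_eq es _, ← hch]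
    rw [inner _ _ (fun x hx => by
      rw [hch] at hx
      obtain ⟨y, hy, rfl⟩ := List.mem_map.mp hx
      exact List.mem_map_of_mem (mem_ordered.mp (List.mem_of_mem_filter hy)))]
    simp

lemma foldl_dfs_eq (es : List (List (String × String)))
    (hkeys : ∀ e ∈ es,
      (e.map Prod.fst).Nodup ∧ "name" ∈ e.map Prod.fst ∧ "reports_to" ∈ e.map Prod.fst) (f : Nat) :
    ∀ (l : List String) (acc : List (List (String × String))),
      (∀ x ∈ l, x ∈ es.map (fun e => pvItem e "name")) →
      l.foldl (fun r n => pvDfs (pvEm es) (pvRm es) f n r) acc =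
        acc ++ l.flatMap (pvWalk (pvEm es) (pvCh es) f) := by
  intro l
  induction l with
  | nil => intro acc _; simp
  | cons x t iht =>
    intro acc hmem
    simp only [List.foldl_cons]
    rw [dfs_eq es hkeys f x (hmem x List.mem_cons_self) acc,
      iht _ (fun y hy => hmem y (List.mem_cons_of_mem x hy))]
    simp [List.append_assoc]

-- ===== VERDICT (by name: the statement is the Claim_ definition above) =====
theorem sort_by_reports_to_spec : Claim_equal_sort_by_reports_to := by
  unfold Claim_equal_sort_by_reports_to
  intro es _ hpre
  unfold Spec_sort_by_reports_to
  rw [sortA_eq, sortB_eq]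
  rw [show (PySem.List.sorted
        (es.filter (fun e => !((pvEm es).contains (pvItem e "reports_to"))))
        (fun x => pvItem x "name")).foldl
        (fun res t => pvDfs (pvEm es) (pvRm es) (es.length + 1) (pvItem t "name") res) [] =
      ((PySem.List.sorted
        (es.filter (fun e => !((pvEm es).contains (pvItem e "reports_to"))))
        (fun x => pvItem x "name")).map (fun e => pvItem e "name")).foldl
        (fun res n => pvDfs (pvEm es) (pvRm es) (es.length + 1) n res) [] from by
    rw [List.foldl_map]]
  rw [sorted_top_names_eq es _]
  rw [foldl_dfs_eq es hpre.1 _ _ [] (fun x hx => by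
    obtain ⟨y, hy, rfl⟩ := List.mem_map.mp hx
    exact List.mem_map_of_mem (mem_ordered.mp (List.mem_of_mem_filter hy)))]
  rw [List.nil_append, List.flatMap_map]
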